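-- pv_equiv track=rewrite | github.com/sunrichard888/warinfo | gdelt_fetcher.py | calculate_country_intensity
-- ===== SOURCE A (Python) =====
-- def calculate_country_intensity(events):
--     """Calculate conflict intensity for countries"""
--     country_data = {}
--
--     for event in events:
--         country = event[1]
--         if country == 'Unknown':
--             continue
--
--         if country not in country_data:
--             country_data[country] = {
--                 'intensity': 0,
--                 'events': 0,
--                 'fatalities': 0,
--                 'injuries': 0
--             }
--
--         # Calculate intensity
--         event_intensity = min(100, event[4] + event[5] + event[4])
--         country_data[country]['intensity'] = max(country_data[country]['intensity'], event_intensity)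
--         country_data[country]['events'] += 1
--         country_data[country]['fatalities'] += event[4]
--         country_data[country]['injuries'] += event[5]
--
--     return country_data
-- ===== SOURCE B (Python) =====
-- def calculate_country_intensity(events):
--     """Calculate conflict intensity for countries (group-then-reduce)."""
--     groups = {}
--     for e in events:
--         if e[1] != 'Unknown':
--             groups.setdefault(e[1], []).append(e)
--     return {
--         c: {
--             'intensity': max(0, *(min(100, 2 * e[4] + e[5]) for e in g)),
--             'events': len(g),
--             'fatalities': sum(e[4] for e in g),
--             'injuries': sum(e[5] for e in g),
--         }
--         for c, g in groups.items()
--     }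
-- ===== Notes on version B (the rewrite author's own statement) =====
-- stated objective: alternative
-- what changed: A streams each event into a nested dict of running aggregates (conditional init plus four in-place updates per event); B first partitions the events into per-country groups with setdefault/append and then computes each country's stats (max-intensity, count, two sums) in a separate reduce pass over the materialized groups.
import Mathlib
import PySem

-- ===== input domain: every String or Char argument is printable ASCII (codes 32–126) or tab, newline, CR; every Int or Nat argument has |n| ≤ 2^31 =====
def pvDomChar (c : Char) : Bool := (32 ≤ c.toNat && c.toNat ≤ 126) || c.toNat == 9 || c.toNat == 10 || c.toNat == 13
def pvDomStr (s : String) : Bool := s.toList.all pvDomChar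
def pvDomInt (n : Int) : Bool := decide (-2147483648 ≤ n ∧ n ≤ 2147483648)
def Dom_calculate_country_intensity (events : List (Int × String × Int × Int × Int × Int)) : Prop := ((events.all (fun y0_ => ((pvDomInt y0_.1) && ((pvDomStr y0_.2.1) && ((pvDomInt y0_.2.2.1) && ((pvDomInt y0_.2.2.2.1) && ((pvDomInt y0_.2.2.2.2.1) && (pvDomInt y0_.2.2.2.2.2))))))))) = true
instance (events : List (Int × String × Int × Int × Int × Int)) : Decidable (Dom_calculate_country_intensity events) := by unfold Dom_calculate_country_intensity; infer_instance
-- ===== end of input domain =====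

-- B groups the events per country first and then reduces each group in one shot; same return value as A (alternative decomposition, no speed claim).

-- ===== PORT A =====
-- one iteration of A's `for event in events` loop (streaming accumulate into nested dicts)
def pvAStep (d : PySem.Dict String (PySem.Dict String Int))
    (e : Int × String × Int × Int × Int × Int) :
    PySem.Dict String (PySem.Dict String Int) :=
  let country := e.2.1
  if country == "Unknown" then d
  else
    let d := if d.contains country then d else
      d.insert country (PySem.Dict.ofList
        [("intensity", 0), ("events", 0), ("fatalities", 0), ("injuries", 0)])
    let ei := min 100 (e.2.2.2.2.1 + e.2.2.2.2.2 + e.2.2.2.2.1)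
    let d := d.modify country PySem.Dict.empty
      (fun cd => cd.insert "intensity" (max (cd.getD "intensity" 0) ei))
    let d := d.modify country PySem.Dict.empty
      (fun cd => cd.insert "events" (cd.getD "events" 0 + 1))
    let d := d.modify country PySem.Dict.empty
      (fun cd => cd.insert "fatalities" (cd.getD "fatalities" 0 + e.2.2.2.2.1))
    let d := d.modify country PySem.Dict.empty
      (fun cd => cd.insert "injuries" (cd.getD "injuries" 0 + e.2.2.2.2.2))
    d

def calculate_country_intensity (events : List (Int × String × Int × Int × Int × Int)) :
    List (String × List (String × Int)) :=
  ((events.foldl pvAStep PySem.Dict.empty).items).map (fun p => (p.1, p.2.items))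

-- ===== PORT B =====
-- B's grouping pass: country -> list of its events, skipping 'Unknown'
def pvGroup (events : List (Int × String × Int × Int × Int × Int)) :
    PySem.Dict String (List (Int × String × Int × Int × Int × Int)) :=
  events.foldl
    (fun d e => if e.2.1 == "Unknown" then d else d.modify e.2.1 [] (· ++ [e]))
    PySem.Dict.empty

-- B's per-event intensity min(100, 2*e[4] + e[5])
def pvEI (e : Int × String × Int × Int × Int × Int) : Int :=
  min 100 (2 * e.2.2.2.2.1 + e.2.2.2.2.2)

-- B's reduce pass over one group
def pvStats (g : List (Int × String × Int × Int × Int × Int)) : List (String × Int) :=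
  [("intensity", (g.map pvEI).foldl max 0),
   ("events", (g.length : Int)),
   ("fatalities", (g.map (fun e => e.2.2.2.2.1)).sum),
   ("injuries", (g.map (fun e => e.2.2.2.2.2)).sum)]

def calculate_country_intensity_alt (events : List (Int × String × Int × Int × Int × Int)) :
    List (String × List (String × Int)) :=
  (pvGroup events).items.map (fun p => (p.1, pvStats p.2))

-- ===== PRECONDITION & SPEC =====
def Spec_calculate_country_intensity (events : List (Int × String × Int × Int × Int × Int)) (out : List (String × List (String × Int))) : Prop := out = calculate_country_intensity_alt events
instance (events : List (Int × String × Int × Int × Int × Int)) (out : List (String × List (String × Int))) : Decidable (Spec_calculate_country_intensity events out) := by unfold Spec_calculate_country_intensity; infer_instance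

-- ===== CLAIM (what is proved, stated in full; the proofs are below) =====
def Claim_equal_calculate_country_intensity : Prop := ∀ (events : List (Int × String × Int × Int × Int × Int)), Dom_calculate_country_intensity events → Spec_calculate_country_intensity events (calculate_country_intensity events)

-- ===== LEMMAS AND PROOFS =====

-- B's per-group stats, packed as the inner dict A maintains for that country
def pvRed (g : List (Int × String × Int × Int × Int × Int)) : PySem.Dict String Int :=
  PySem.Dict.mk (pvStats g)

-- A's outer state corresponding to a grouping state of B
def pvMapD (G : PySem.Dict String (List (Int × String × Int × Int × Int × Int))) :
    PySem.Dict String (PySem.Dict String Int) :=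
  PySem.Dict.mk (G.items.map (fun p => (p.1, pvRed p.2)))

lemma pvMapD_contains (G : PySem.Dict String (List (Int × String × Int × Int × Int × Int)))
    (c : String) : (pvMapD G).contains c = G.contains c := by
  simp [pvMapD, PySem.Dict.contains, List.any_map, Function.comp_def]

lemma pvMapD_get? (G : PySem.Dict String (List (Int × String × Int × Int × Int × Int)))
    (c : String) : (pvMapD G).get? c = (G.get? c).map pvRed := by
  simp [pvMapD, PySem.Dict.get?, List.find?_map, Function.comp_def]

lemma pvMapD_insert (G : PySem.Dict String (List (Int × String × Int × Int × Int × Int)))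
    (c : String) (l : List (Int × String × Int × Int × Int × Int)) :
    pvMapD (G.insert c l) = (pvMapD G).insert c (pvRed l) := by
  apply PySem.Dict.ext
  show ((G.insert c l).items).map (fun p => (p.1, pvRed p.2)) = _
  rw [PySem.Dict.items_insert, PySem.Dict.items_insert, pvMapD_contains]
  by_cases hc : G.contains c = true
  · simp only [hc, if_true]
    show _ = List.map _ (pvMapD G).items
    simp only [pvMapD, List.map_map]
    congr 1
    funext p
    by_cases hp : (p.1 == c) = true <;> simp [Function.comp, hp]
  · simp only [hc, if_false, Bool.false_eq_true]
    show _ = (pvMapD G).items ++ _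
    simp [pvMapD]

lemma pv_step_comm (G : PySem.Dict String (List (Int × String × Int × Int × Int × Int)))
    (e : Int × String × Int × Int × Int × Int) :
    pvAStep (pvMapD G) e =
      pvMapD (if e.2.1 == "Unknown" then G else G.modify e.2.1 [] (· ++ [e])) := by
  by_cases hu : (e.2.1 == "Unknown") = true
  · simp [pvAStep, hu]
  · simp only [pvAStep, hu, Bool.false_eq_true, if_false, pvMapD_contains]
    by_cases hG : G.contains e.2.1 = true
    · rw [if_pos hG]
      obtain ⟨h, hh⟩ : ∃ h, G.get? e.2.1 = some h := by
        have h1 := PySem.Dict.contains_eq_isSome_get? (d := G) (k := e.2.1)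
        rw [hG] at h1
        exact Option.isSome_iff_exists.mp h1.symm
      have hD : (pvMapD G).getD e.2.1 PySem.Dict.empty = pvRed h := by
        rw [PySem.Dict.getD_eq_get?_getD, pvMapD_get?, hh]; rfl
      have hG2 : G.getD e.2.1 [] = h := by
        rw [PySem.Dict.getD_eq_get?_getD, hh]; rfl
      simp only [PySem.Dict.modify, PySem.Dict.getD_insert_self,
        PySem.Dict.insert_insert_self, hD, hG2, pvMapD_insert]
      congr 1
      simp [pvRed, pvStats, PySem.Dict.insert, PySem.Dict.getD, PySem.Dict.get?,
        PySem.Dict.contains, pvEI, List.foldl_append]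
      omega
    · rw [if_neg hG]
      have hofl : (PySem.Dict.ofList
          [("intensity", (0:Int)), ("events", 0), ("fatalities", 0), ("injuries", 0)]
          : PySem.Dict String Int) = pvRed [] := by rfl
      rw [hofl, ← pvMapD_insert]
      have hG2 : G.getD e.2.1 [] = [] := by
        rw [PySem.Dict.getD_of_not_contains]
        exact Bool.not_eq_true _ |>.mp hG
      simp only [PySem.Dict.modify, PySem.Dict.getD_insert_self,
        PySem.Dict.insert_insert_self, hG2, pvMapD_insert]
      congr 1
      simp [pvRed, pvStats, PySem.Dict.insert, PySem.Dict.getD, PySem.Dict.get?,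
        PySem.Dict.contains, pvEI]
      omega

lemma pv_main (events : List (Int × String × Int × Int × Int × Int))
    (G : PySem.Dict String (List (Int × String × Int × Int × Int × Int))) :
    events.foldl pvAStep (pvMapD G) =
      pvMapD (events.foldl
        (fun d e => if e.2.1 == "Unknown" then d else d.modify e.2.1 [] (· ++ [e])) G) := by
  induction events generalizing G with
  | nil => rfl
  | cons e tl ih =>
    simp only [List.foldl_cons]
    rw [pv_step_comm]
    exact ih _

-- ===== VERDICT (by name: the statement is the Claim_ definition above) =====
theorem calculate_country_intensity_spec : Claim_equal_calculate_country_intensity := by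
  intro events _
  unfold Spec_calculate_country_intensity calculate_country_intensity
    calculate_country_intensity_alt pvGroup
  have h := pv_main events PySem.Dict.empty
  have he : pvMapD PySem.Dict.empty = PySem.Dict.empty := rfl
  rw [he] at h
  rw [h]
  simp [pvMapD, pvRed, List.map_map, Function.comp]
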